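-- pv_equiv track=rewrite | github.com/UTSAVS26/PySnippets | pysnippets/Strings/Capitalization.py | alternate_capitalization
-- ===== SOURCE A (Python) =====
-- def alternate_capitalization(text):
--     """Capitalize characters in an alternating pattern."""
--     result = []
--     upper = True
--     for char in text:
--         if char.isalpha():
--             result.append(char.upper() if upper else char.lower())
--             upper = not upper
--         else:
--             result.append(char)
--     return ''.join(result)
-- ===== SOURCE B (Python) =====
-- def alternate_capitalization(text):
--     """Capitalize characters in an alternating pattern (two-phase rebuild)."""
--     letters = [c for c in text if c.isalpha()]
--     transformed = [c.upper() if i % 2 == 0 else c.lower() for i, c in enumerate(letters)]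
--     it = iter(transformed)
--     return ''.join(next(it) if c.isalpha() else c for c in text)
-- ===== Notes on version B (the rewrite author's own statement) =====
-- stated objective: alternative
-- what changed: Replaces the single-pass toggle-flag loop by a two-phase decomposition: collect the alphabetic characters, case them by index parity, then rebuild the string by consuming that list at alpha positions.
import Mathlib
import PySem

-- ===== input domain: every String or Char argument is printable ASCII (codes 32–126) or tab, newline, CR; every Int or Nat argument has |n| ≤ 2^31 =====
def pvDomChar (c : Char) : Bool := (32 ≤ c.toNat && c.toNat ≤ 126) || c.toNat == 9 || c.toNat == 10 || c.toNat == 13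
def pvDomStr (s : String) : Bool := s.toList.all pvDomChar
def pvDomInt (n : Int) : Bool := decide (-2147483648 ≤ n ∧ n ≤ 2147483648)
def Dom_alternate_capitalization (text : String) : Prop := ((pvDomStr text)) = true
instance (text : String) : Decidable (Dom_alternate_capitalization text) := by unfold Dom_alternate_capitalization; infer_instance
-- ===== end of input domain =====

-- B replaces A's single-pass toggle-flag loop by a two-phase rebuild (case letters by index parity, then splice them back); alternative decomposition, same cost.

-- ===== PORT A =====
-- for char in text: toggle 'upper' on alphabetic chars, append cased char; join at the end
def alternate_capitalization (text : String) : String :=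
  let st := text.toList.foldl
    (fun (st : List Char × Bool) (c : Char) =>
      if PySem.Chars.isalpha c then
        (st.1 ++ [if st.2 then PySem.Chars.upperChar c else PySem.Chars.lowerChar c], !st.2)
      else
        (st.1 ++ [c], st.2))
    ([], true)
  String.mk st.1

-- ===== PORT B =====
-- letters = [c for c in text if c.isalpha()]
def altLetters (cs : List Char) : List Char :=
  cs.filter (fun c => PySem.Chars.isalpha c)

-- transformed = [c.upper() if i % 2 == 0 else c.lower() for i, c in enumerate(letters)]
def altTransform (i : Nat) : List Char → List Char
  | [] => []
  | c :: cs =>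
      (if i % 2 == 0 then PySem.Chars.upperChar c else PySem.Chars.lowerChar c)
        :: altTransform (i + 1) cs

-- ''.join(next(it) if c.isalpha() else c for c in text): consume the transformed letters at alpha positions
def altRebuild : List Char → List Char → List Char
  | [], _ => []
  | c :: cs, ts =>
      if PySem.Chars.isalpha c then
        match ts with
        | t :: ts' => t :: altRebuild cs ts'
        | [] => []          -- unreachable: one transformed letter per alphabetic char
      else
        c :: altRebuild cs ts

def alternate_capitalization_alt (text : String) : String :=
  String.mk (altRebuild text.toList (altTransform 0 (altLetters text.toList)))

-- ===== PRECONDITION & SPEC =====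
def Spec_alternate_capitalization (text : String) (out : String) : Prop := out = alternate_capitalization_alt text
instance (text : String) (out : String) : Decidable (Spec_alternate_capitalization text out) := by unfold Spec_alternate_capitalization; infer_instance

-- ===== CLAIM (what is proved, stated in full; the proofs are below) =====
def Claim_equal_alternate_capitalization : Prop := ∀ (text : String), Dom_alternate_capitalization text → Spec_alternate_capitalization text (alternate_capitalization text)

-- ===== LEMMAS AND PROOFS =====

-- direct-recursion form of A's loop
def altGo (b : Bool) : List Char → List Char
  | [] => []
  | c :: cs =>
      if PySem.Chars.isalpha c then
        (if b then PySem.Chars.upperChar c else PySem.Chars.lowerChar c) :: altGo (!b) cs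
      else
        c :: altGo b cs

theorem altFold_eq_go (cs : List Char) : ∀ (acc : List Char) (b : Bool),
    (cs.foldl
      (fun (st : List Char × Bool) (c : Char) =>
        if PySem.Chars.isalpha c then
          (st.1 ++ [if st.2 then PySem.Chars.upperChar c else PySem.Chars.lowerChar c], !st.2)
        else
          (st.1 ++ [c], st.2))
      (acc, b)).1 = acc ++ altGo b cs := by
  induction cs with
  | nil => intro acc b; simp [altGo]
  | cons c cs ih =>
      intro acc b
      by_cases h : PySem.Chars.isalpha c = true <;>
        simp [altGo, h, ih, List.append_assoc]

-- parity-normal form of altTransform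
def altSeq (b : Bool) : List Char → List Char
  | [] => []
  | c :: cs =>
      (if b then PySem.Chars.upperChar c else PySem.Chars.lowerChar c) :: altSeq (!b) cs

theorem altTransform_eq_seq (cs : List Char) : ∀ (i : Nat),
    altTransform i cs = altSeq (i % 2 == 0) cs := by
  induction cs with
  | nil => intro i; simp [altTransform, altSeq]
  | cons c cs ih =>
      intro i
      have hpar : ((i + 1) % 2 == 0) = !(i % 2 == 0) := by
        rcases Nat.mod_two_eq_zero_or_one i with h | h <;> simp [Nat.add_mod, h]
      simp [altTransform, altSeq, ih, hpar]

theorem altRebuild_seq (cs : List Char) : ∀ (b : Bool),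
    altRebuild cs (altSeq b (altLetters cs)) = altGo b cs := by
  induction cs with
  | nil => intro b; rfl
  | cons c cs ih =>
      intro b
      by_cases h : PySem.Chars.isalpha c = true
      · simp only [altRebuild, altLetters, altGo, altSeq, List.filter_cons, h, if_pos]
        simpa [altLetters] using ih (!b)
      · simp only [altRebuild, altLetters, altGo, List.filter_cons, h]
        simpa [altLetters, h] using ih b

-- ===== VERDICT (by name: the statement is the Claim_ definition above) =====
theorem alternate_capitalization_spec : Claim_equal_alternate_capitalization := by
  intro text _
  unfold Spec_alternate_capitalization alternate_capitalization alternate_capitalization_alt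
  simp only [altFold_eq_go, List.nil_append, altTransform_eq_seq]
  rw [show ((0 : Nat) % 2 == 0) = true from rfl, altRebuild_seq]
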